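-- pv_equiv track=rewrite | github.com/Hubtler/Advent-of-Code-2025 | Day06.py | part2
-- ===== SOURCE A (Python) =====
-- def part2(input):
--     line_ended = True
--     lines = input.split("\n")
--     results = []
--     for ind in range(len(lines[0])):
--         if line_ended:
--             numbers_col = []
--         line_ended = True
--         number = ""
--         for line in lines:
--             if not line[ind] in " +*":
--                 line_ended = False
--                 number += line[ind]
--             if line[ind] in "*+":
--                 operator = line[ind]
--
--         if not line_ended:
--             numbers_col.append( int(number) )
--         else:
--             if operator == "*":
--                 result = 1
--                 for number in numbers_col:
--                     result *= number
--             elif operator == "+":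
--                 result = 0
--                 for number in numbers_col:
--                     result += number
--             results.append(result)
--     if not line_ended:
--         if operator == "*":
--             result = 1
--             for number in numbers_col:
--                 result *= number
--         elif operator == "+":
--             result = 0
--             for number in numbers_col:
--                 result += number
--         results.append(result)
--     return sum(results)
-- ===== SOURCE B (Python) =====
-- def _apply(op, group):
--     if op == "*":
--         r = 1
--         for n in group:
--             r *= n
--         return r
--     return sum(group)
--
--
-- def _total(cols, op, group):
--     if not cols:
--         return _apply(op, group) if group else 0
--     col, rest = cols[0], cols[1:]
--     ops = [c for c in col if c in "*+"]
--     if ops: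
--         op = ops[-1]
--     nums = "".join(c for c in col if c not in " +*")
--     if nums:
--         return _total(rest, op, group + [int(nums)])
--     return _apply(op, group) + _total(rest, op, [])
--
--
-- def part2(input):
--     lines = input.split("\n")
--     cols = ["".join(l[i] for l in lines) for i in range(len(lines[0]))]
--     return _total(cols, None, [])
-- ===== Notes on version B (the rewrite author's own statement) =====
-- stated objective: alternative
-- what changed: A's single fused iterative column loop with mutable cross-iteration state (line_ended flag, numbers_col, results list) is replaced by transposing the grid into column strings via comprehensions and then a recursive function over that list that accumulates the grand total directly through recursion (filter/last for the operator, filter/join for the digits), with no flags or results list.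
import Mathlib
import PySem

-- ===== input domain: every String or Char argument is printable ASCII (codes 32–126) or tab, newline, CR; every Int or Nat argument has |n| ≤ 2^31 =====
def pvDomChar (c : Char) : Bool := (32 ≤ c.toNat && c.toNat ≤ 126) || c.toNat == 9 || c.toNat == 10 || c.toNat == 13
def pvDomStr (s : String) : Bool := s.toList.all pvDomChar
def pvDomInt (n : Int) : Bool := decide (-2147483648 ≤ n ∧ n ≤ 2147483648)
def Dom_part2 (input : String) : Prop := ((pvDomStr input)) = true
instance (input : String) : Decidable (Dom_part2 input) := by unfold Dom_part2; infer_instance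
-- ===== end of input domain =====

-- B replaces A's fused iterative column loop (mutable line_ended/numbers_col/operator/results state) by a
-- transposed list of column strings and a recursive total-accumulating function over it;
-- objective: alternative decomposition, same cost. Equivalence is claimed on Pre_part2, exactly the inputs where A returns.

-- shared parsing helper: input.split("\n") as lists of chars
def pvLines (input : String) : List (List Char) :=
  PySem.Chars.splitOn input.toList ['\n']

-- ===== PORT A =====
-- Python A's duplicated result-computation block ("if operator == '*': … elif operator == '+': …");
-- the final `else 0` is the NameError case (operator/result undefined), excluded by Pre_part2.
def pvEvalA (op : Char) (ns : List Int) : Int :=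
  if op = '*' then ns.foldl (· * ·) 1
  else if op = '+' then ns.foldl (· + ·) 0
  else 0

-- state: (line_ended, numbers_col, operator, results); operator starts as the garbage ' ' (Python: undefined)
def part2 (input : String) : Int :=
  let lines := pvLines input
  let s := (List.range (lines.headD []).length).foldl
    (fun (s : Bool × List Int × Char × List Int) (ind : Nat) =>
      let numbers_col := if s.1 then ([] : List Int) else s.2.1
      let t := lines.foldl
        (fun (t : Bool × List Char × Char) line =>
          let c := (PySem.List.pyGet? line (ind : Int)).getD ' '   -- line[ind]; none = IndexError, outside Pre_
          let t1 : Bool × List Char :=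
            if c ≠ ' ' ∧ c ≠ '+' ∧ c ≠ '*' then (false, t.2.1 ++ [c]) else (t.1, t.2.1)
          (t1.1, t1.2, if c = '*' ∨ c = '+' then c else t.2.2))
        (true, ([] : List Char), s.2.2.1)
      if t.1 = false then
        (false, numbers_col ++ [(PySem.Int.ofChars? t.2.1).getD 0], t.2.2, s.2.2.2)  -- int(number); none = ValueError, outside Pre_
      else
        (true, numbers_col, t.2.2, s.2.2.2 ++ [pvEvalA t.2.2 numbers_col]))
    (true, [], ' ', [])
  (if s.1 = false then s.2.2.2 ++ [pvEvalA s.2.2.1 s.2.1] else s.2.2.2).sum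

-- ===== PORT B =====
-- column string at index ind: "".join(l[ind] for l in lines); none = IndexError, outside Pre_
def pvReadCol (lines : List (List Char)) (ind : Int) : List Char :=
  lines.map (fun l => (PySem.List.pyGet? l ind).getD ' ')

-- B's helper _apply(op, group)
def pvApply (op : Option Char) (group : List Int) : Int :=
  if op = some '*' then group.foldl (· * ·) 1 else group.sum

-- B's helper _total(cols, op, group): recursion over the column strings, summing directly
def pvTotal : List (List Char) → Option Char → List Int → Int
  | [], op, group => if group ≠ [] then pvApply op group else 0
  | col :: rest, op, group =>
    let ops := col.filter (fun c => c = '*' ∨ c = '+')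
    let op' := match ops.getLast? with | some c => some c | none => op
    let nums := col.filter (fun c => ¬(c = ' ' ∨ c = '+' ∨ c = '*'))
    if nums ≠ [] then pvTotal rest op' (group ++ [(PySem.Int.ofChars? nums).getD 0])
    else pvApply op' group + pvTotal rest op' []

def part2_alt (input : String) : Int :=
  let lines := pvLines input
  let cols := (List.range (lines.headD []).length).map fun (ind : Nat) => pvReadCol lines (ind : Int)
  pvTotal cols none []

-- ===== PRECONDITION & SPEC =====
-- per-column record used only to STATE the precondition: (non-' +*' chars, last operator char)
def pvColRec (lines : List (List Char)) (ind : Int) : List Char × Option Char :=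
  lines.foldl
    (fun (r : List Char × Option Char) line =>
      let c := (PySem.List.pyGet? line ind).getD ' '
      (if c ≠ ' ' ∧ c ≠ '+' ∧ c ≠ '*' then r.1 ++ [c] else r.1,
       if c = '*' ∨ c = '+' then some c else r.2))
    ([], none)

def pvMerge (o r : Option Char) : Option Char := match r with | some c => some c | none => o

def pvColsOf (input : String) : List (List Char × Option Char) :=
  let lines := pvLines input
  (List.range (lines.headD []).length).map fun (ind : Nat) => pvColRec lines (ind : Int)

-- every separator column (no non-' +*' chars) must already have an operator in scope (else Python: NameError)
def pvOkCols (o : Option Char) : List (List Char × Option Char) → Bool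
  | [] => true
  | r :: rs => (!r.1.isEmpty || (pvMerge o r.2).isSome) && pvOkCols (pvMerge o r.2) rs

-- the trailing flush (last column a number column) also needs an operator in scope
def pvTailOk (o : Option Char) (e : Bool) : List (List Char × Option Char) → Bool
  | [] => !e → o.isSome
  | r :: rs => pvTailOk (pvMerge o r.2) r.1.isEmpty rs

-- Pre_part2 holds exactly where Python A returns normally: every line at least as long as lines[0]
-- (else IndexError), every number column parses as int (else ValueError), and every separator
-- column and the trailing flush see a previously-set operator (else NameError).
def Pre_part2 (input : String) : Prop :=
  ((pvLines input).all fun l => ((pvLines input).headD []).length ≤ l.length) = true ∧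
  ((pvColsOf input).all fun r => r.1.isEmpty || (PySem.Int.ofChars? r.1).isSome) = true ∧
  pvOkCols none (pvColsOf input) = true ∧
  pvTailOk none true (pvColsOf input) = true
instance (input : String) : Decidable (Pre_part2 input) := by unfold Pre_part2; infer_instance

def pvWitness_part2 : String := "1 2\n3 4\n+ *"

def Spec_part2 (input : String) (out : Int) : Prop := out = part2_alt input
instance (input : String) (out : Int) : Decidable (Spec_part2 input out) := by unfold Spec_part2; infer_instance

-- ===== CLAIM (what is proved, stated in full; the proofs are below) =====
def Claim_equal_part2 : Prop := ∀ (input : String), Dom_part2 input → Pre_part2 input → Spec_part2 input (part2 input)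

-- ===== LEMMAS AND PROOFS =====

-- A's column body, expressed as a function of the column record
def pvStepA (s : Bool × List Int × Char × List Int) (r : List Char × Option Char) :
    Bool × List Int × Char × List Int :=
  let nc := if s.1 then ([] : List Int) else s.2.1
  let op := match r.2 with | some c => c | none => s.2.2.1
  if r.1 ≠ [] then (false, nc ++ [(PySem.Int.ofChars? r.1).getD 0], op, s.2.2.2)
  else (true, nc, op, s.2.2.2 ++ [pvEvalA op nc])

-- B's record of a column string: (its non-' +*' chars, its last operator char)
def pvRecB (col : List Char) : List Char × Option Char :=
  (col.filter (fun c => ¬(c = ' ' ∨ c = '+' ∨ c = '*')),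
   (col.filter (fun c => c = '*' ∨ c = '+')).getLast?)

-- the column-record fold from a general start state
lemma pvColRec_go (lines : List (List Char)) (ind : Int) (d : List Char) (co : Option Char) :
    lines.foldl
      (fun (r : List Char × Option Char) line =>
        let c := (PySem.List.pyGet? line ind).getD ' '
        (if c ≠ ' ' ∧ c ≠ '+' ∧ c ≠ '*' then r.1 ++ [c] else r.1,
         if c = '*' ∨ c = '+' then some c else r.2))
      (d, co)
    = (d ++ (pvColRec lines ind).1, pvMerge co (pvColRec lines ind).2) := by
  induction lines generalizing d co with
  | nil => simp [pvColRec, pvMerge]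
  | cons line rest ih =>
    simp only [List.foldl_cons, pvColRec]
    rw [ih, ih]
    by_cases h1 : ((PySem.List.pyGet? line ind).getD ' ') ≠ ' ' ∧
        ((PySem.List.pyGet? line ind).getD ' ') ≠ '+' ∧ ((PySem.List.pyGet? line ind).getD ' ') ≠ '*' <;>
      by_cases h2 : ((PySem.List.pyGet? line ind).getD ' ') = '*' ∨ ((PySem.List.pyGet? line ind).getD ' ') = '+' <;>
      cases (pvColRec rest ind).2 <;>
      simp [h1, h2, pvMerge]

lemma pvColRec_cons_fst (line : List Char) (rest : List (List Char)) (ind : Int) :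
    (pvColRec (line :: rest) ind).1
      = (if ((PySem.List.pyGet? line ind).getD ' ') ≠ ' ' ∧ ((PySem.List.pyGet? line ind).getD ' ') ≠ '+' ∧
            ((PySem.List.pyGet? line ind).getD ' ') ≠ '*' then [(PySem.List.pyGet? line ind).getD ' '] else [])
        ++ (pvColRec rest ind).1 := by
  conv_lhs => rw [pvColRec]
  rw [List.foldl_cons]
  simp only []
  rw [pvColRec_go]
  split_ifs <;> simp

lemma pvColRec_cons_snd (line : List Char) (rest : List (List Char)) (ind : Int) :
    (pvColRec (line :: rest) ind).2
      = pvMerge (if ((PySem.List.pyGet? line ind).getD ' ') = '*' ∨ ((PySem.List.pyGet? line ind).getD ' ') = '+'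
                 then some ((PySem.List.pyGet? line ind).getD ' ') else none) (pvColRec rest ind).2 := by
  conv_lhs => rw [pvColRec]
  rw [List.foldl_cons]
  simp only []
  rw [pvColRec_go]

-- getLast? of a cons, in pvMerge form
lemma pvGetLast_cons_merge (a : Char) (l : List Char) :
    (a :: l).getLast? = pvMerge (some a) l.getLast? := by
  induction l with
  | nil => simp [pvMerge]
  | cons b bs _ =>
    rw [List.getLast?_cons_cons]
    cases h : (b :: bs).getLast? with
    | none => simp [List.getLast?_eq_none_iff] at h
    | some d => simp [pvMerge]

lemma pvMergeNone (o : Option Char) : pvMerge none o = o := by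
  cases o <;> rfl

lemma pvRecB_cons (c : Char) (cs : List Char) :
    pvRecB (c :: cs)
      = ((if c ≠ ' ' ∧ c ≠ '+' ∧ c ≠ '*' then [c] else []) ++ (pvRecB cs).1,
         pvMerge (if c = '*' ∨ c = '+' then some c else none) (pvRecB cs).2) := by
  apply Prod.ext
  · simp only [pvRecB, List.filter_cons]
    by_cases hn : c ≠ ' ' ∧ c ≠ '+' ∧ c ≠ '*' <;> simp [hn]
  · simp only [pvRecB, List.filter_cons]
    by_cases ho : c = '*' ∨ c = '+'
    · simp only [ho, decide_eq_true_eq, if_pos]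
      rw [pvGetLast_cons_merge]
    · simp [ho, pvMergeNone]

-- the record of a column string equals the fold-computed record A's rewriting uses
lemma pvRecB_eq_colRec (lines : List (List Char)) (ind : Int) :
    pvRecB (pvReadCol lines ind) = pvColRec lines ind := by
  induction lines with
  | nil => simp [pvRecB, pvReadCol, pvColRec]
  | cons line rest ih =>
    have hread : pvReadCol (line :: rest) ind
        = ((PySem.List.pyGet? line ind).getD ' ') :: pvReadCol rest ind := by
      simp [pvReadCol]
    rw [hread, pvRecB_cons, ih]
    apply Prod.ext
    · rw [pvColRec_cons_fst]
    · rw [pvColRec_cons_snd]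

-- every operator the record carries is '*' or '+'
lemma pvRecB_op_cases (col : List Char) :
    (pvRecB col).2 = none ∨ (pvRecB col).2 = some '*' ∨ (pvRecB col).2 = some '+' := by
  cases h : (pvRecB col).2 with
  | none => exact Or.inl rfl
  | some d =>
    have hd : d ∈ col.filter (fun c => c = '*' ∨ c = '+') := by
      simp only [pvRecB] at h
      exact List.mem_of_getLast? h
    have := List.of_mem_filter hd
    simp only [decide_eq_true_eq] at this
    rcases this with h' | h' <;> simp [h']

-- A's inner line scan, expressed through the column record
lemma pvInnerA_eq (lines : List (List Char)) (ind : Int) (e : Bool) (num : List Char) (op : Char) :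
    lines.foldl
      (fun (t : Bool × List Char × Char) line =>
        let c := (PySem.List.pyGet? line ind).getD ' '
        let t1 : Bool × List Char :=
          if c ≠ ' ' ∧ c ≠ '+' ∧ c ≠ '*' then (false, t.2.1 ++ [c]) else (t.1, t.2.1)
        (t1.1, t1.2, if c = '*' ∨ c = '+' then c else t.2.2))
      (e, num, op)
    = (e && (pvColRec lines ind).1.isEmpty, num ++ (pvColRec lines ind).1,
       match (pvColRec lines ind).2 with | some c => c | none => op) := by
  induction lines generalizing e num op with
  | nil => simp [pvColRec]
  | cons line rest ih =>
    rw [List.foldl_cons]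
    simp only []
    rw [ih, pvColRec_cons_fst, pvColRec_cons_snd]
    by_cases h1 : ((PySem.List.pyGet? line ind).getD ' ') ≠ ' ' ∧
        ((PySem.List.pyGet? line ind).getD ' ') ≠ '+' ∧ ((PySem.List.pyGet? line ind).getD ' ') ≠ '*' <;>
      by_cases h2 : ((PySem.List.pyGet? line ind).getD ' ') = '*' ∨ ((PySem.List.pyGet? line ind).getD ' ') = '+' <;>
      first
      | (exact absurd h2 (by tauto))
      | (cases (pvColRec rest ind).2 <;> simp [h1, h2, pvMerge])

-- A's range-loop body is pvStepA applied to the column record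
lemma pvBodyA_funext (lines : List (List Char)) :
    (fun (s : Bool × List Int × Char × List Int) (ind : Nat) =>
      let numbers_col := if s.1 then ([] : List Int) else s.2.1
      let t := lines.foldl
        (fun (t : Bool × List Char × Char) line =>
          let c := (PySem.List.pyGet? line (ind : Int)).getD ' '
          let t1 : Bool × List Char :=
            if c ≠ ' ' ∧ c ≠ '+' ∧ c ≠ '*' then (false, t.2.1 ++ [c]) else (t.1, t.2.1)
          (t1.1, t1.2, if c = '*' ∨ c = '+' then c else t.2.2))
        (true, ([] : List Char), s.2.2.1)
      if t.1 = false then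
        (false, numbers_col ++ [(PySem.Int.ofChars? t.2.1).getD 0], t.2.2, s.2.2.2)
      else
        (true, numbers_col, t.2.2, s.2.2.2 ++ [pvEvalA t.2.2 numbers_col]))
    = (fun (s : Bool × List Int × Char × List Int) (ind : Nat) => pvStepA s (pvColRec lines (ind : Int))) := by
  funext s ind
  simp only []
  rw [pvInnerA_eq]
  simp only [pvStepA, Bool.true_and, List.nil_append]
  by_cases hd : (pvColRec lines (ind : Int)).1 = [] <;>
    simp [hd]

lemma pvFoldA_eq (lines : List (List Char)) (w : Nat) :
    (List.range w).foldl
      (fun (s : Bool × List Int × Char × List Int) (ind : Nat) =>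
        let numbers_col := if s.1 then ([] : List Int) else s.2.1
        let t := lines.foldl
          (fun (t : Bool × List Char × Char) line =>
            let c := (PySem.List.pyGet? line (ind : Int)).getD ' '
            let t1 : Bool × List Char :=
              if c ≠ ' ' ∧ c ≠ '+' ∧ c ≠ '*' then (false, t.2.1 ++ [c]) else (t.1, t.2.1)
            (t1.1, t1.2, if c = '*' ∨ c = '+' then c else t.2.2))
          (true, ([] : List Char), s.2.2.1)
        if t.1 = false then
          (false, numbers_col ++ [(PySem.Int.ofChars? t.2.1).getD 0], t.2.2, s.2.2.2)
        else
          (true, numbers_col, t.2.2, s.2.2.2 ++ [pvEvalA t.2.2 numbers_col]))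
      (true, [], ' ', [])
    = ((List.range w).map fun (ind : Nat) => pvColRec lines (ind : Int)).foldl
        pvStepA (true, [], ' ', []) := by
  rw [pvBodyA_funext lines, List.foldl_map]

lemma part2_eq (input : String) :
    part2 input =
      (let s := (pvColsOf input).foldl pvStepA (true, [], ' ', []);
       (if s.1 = false then s.2.2.2 ++ [pvEvalA s.2.2.1 s.2.1] else s.2.2.2).sum) := by
  unfold part2 pvColsOf
  exact congrArg
    (fun s : Bool × List Int × Char × List Int =>
      (if s.1 = false then s.2.2.2 ++ [pvEvalA s.2.2.1 s.2.1] else s.2.2.2).sum)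
    (pvFoldA_eq (pvLines input) ((pvLines input).headD []).length)

-- B's recursion, written through the column records
lemma pvTotal_eq_rec (cols : List (List Char)) (op : Option Char) (group : List Int) :
    pvTotal cols op group =
      (match cols with
       | [] => if group ≠ [] then pvApply op group else 0
       | col :: rest =>
         let op' := pvMerge op (pvRecB col).2
         if (pvRecB col).1 ≠ [] then
           pvTotal rest op' (group ++ [(PySem.Int.ofChars? (pvRecB col).1).getD 0])
         else pvApply op' group + pvTotal rest op' []) := by
  cases cols with
  | nil => rfl
  | cons col rest =>
    simp only [pvTotal, pvRecB, pvMerge]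

lemma pvEvalA_eq_pvApply (opB : Option Char)
    (hopB : opB = some '*' ∨ opB = some '+') (nc : List Int) :
    pvEvalA (opB.elim ' ' id) nc = pvApply opB nc := by
  rcases hopB with h | h <;> subst h <;>
    simp [pvEvalA, pvApply, List.sum_eq_foldl]

-- the main invariant: A's fold over the records equals B's directly-summing recursion over the columns
lemma pvMain (cols : List (List Char)) :
    ∀ (e : Bool) (nc results : List Int) (opB : Option Char),
    pvOkCols opB (cols.map pvRecB) = true →
    pvTailOk opB e (cols.map pvRecB) = true →
    (opB = none ∨ opB = some '*' ∨ opB = some '+') →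
    (e = false → nc ≠ []) →
    (let sA := (cols.map pvRecB).foldl pvStepA (e, nc, opB.elim ' ' id, results);
     (if sA.1 = false then sA.2.2.2 ++ [pvEvalA sA.2.2.1 sA.2.1] else sA.2.2.2).sum)
      = results.sum + pvTotal cols opB (if e then [] else nc) := by
  induction cols with
  | nil =>
    intro e nc results opB _ htail hopB hne
    simp only [List.map_nil, List.foldl_nil, pvTotal]
    cases e with
    | true => simp
    | false =>
      simp only [List.map_nil, pvTailOk, Bool.not_false] at htail
      have hsome : opB = some '*' ∨ opB = some '+' := by
        rcases hopB with h | h | h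
        · rw [h] at htail; simp at htail
        · exact Or.inl h
        · exact Or.inr h
      simp [hne rfl, pvEvalA_eq_pvApply opB hsome nc, List.sum_append]
  | cons col rs ih =>
    intro e nc results opB hok htail hopB hne
    have hr2 := pvRecB_op_cases col
    have hopB' : pvMerge opB (pvRecB col).2 = none ∨ pvMerge opB (pvRecB col).2 = some '*' ∨
        pvMerge opB (pvRecB col).2 = some '+' := by
      rcases hr2 with h | h | h <;> rw [h] <;> simp [pvMerge]
      exact hopB
    have hmerge_elim : (match (pvRecB col).2 with | some c => c | none => opB.elim ' ' id)
        = (pvMerge opB (pvRecB col).2).elim ' ' id := by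
      cases (pvRecB col).2 <;> rfl
    simp only [List.map_cons, pvOkCols, Bool.and_eq_true] at hok
    simp only [List.map_cons, pvTailOk] at htail
    rw [pvTotal_eq_rec]
    simp only [List.map_cons, List.foldl_cons]
    by_cases hd : (pvRecB col).1 = []
    · -- separator column: A appends an evaluated result, B adds to the running total
      have hie : (pvRecB col).1.isEmpty = true := by simp [hd]
      rw [hie] at htail
      have hopSome : pvMerge opB (pvRecB col).2 = some '*' ∨ pvMerge opB (pvRecB col).2 = some '+' := by
        rcases hopB' with h | h | h
        · exfalso; rcases hok with ⟨hok1, _⟩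
          rw [hie, h] at hok1; simp at hok1
        · exact Or.inl h
        · exact Or.inr h
      have hA : pvStepA (e, nc, opB.elim ' ' id, results) (pvRecB col)
          = (true, if e then [] else nc, (pvMerge opB (pvRecB col).2).elim ' ' id,
             results ++ [pvEvalA ((pvMerge opB (pvRecB col).2).elim ' ' id) (if e then [] else nc)]) := by
        simp [pvStepA, hd, hmerge_elim]
      rw [hA]
      have hrec := ih true (if e then [] else nc)
        (results ++ [pvEvalA ((pvMerge opB (pvRecB col).2).elim ' ' id) (if e then [] else nc)])
        (pvMerge opB (pvRecB col).2) hok.2 htail hopB' (by simp)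
      simp only [if_pos trivial] at hrec
      rw [hrec, List.sum_append, pvEvalA_eq_pvApply _ hopSome]
      simp [hd]
      ring
    · -- number column: both append the parsed number to the current group
      have hie : (pvRecB col).1.isEmpty = false := by simpa using hd
      rw [hie] at htail
      have hA : pvStepA (e, nc, opB.elim ' ' id, results) (pvRecB col)
          = (false, (if e then [] else nc) ++ [(PySem.Int.ofChars? (pvRecB col).1).getD 0],
             (pvMerge opB (pvRecB col).2).elim ' ' id, results) := by
        simp [pvStepA, hd, hmerge_elim]
      rw [hA]
      have hrec := ih false ((if e then [] else nc) ++ [(PySem.Int.ofChars? (pvRecB col).1).getD 0]) results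
        (pvMerge opB (pvRecB col).2) hok.2 htail hopB' (by simp)
      rw [hrec]
      simp [hd]

-- ===== VERDICT (by name: the statement is the Claim_ definition above) =====
theorem part2_spec : Claim_equal_part2 := by
  intro input _hdom hpre
  unfold Spec_part2
  obtain ⟨_hlen, _hparse, hok, htail⟩ := hpre
  have hcols : pvColsOf input
      = ((List.range ((pvLines input).headD []).length).map
          fun (ind : Nat) => pvReadCol (pvLines input) (ind : Int)).map pvRecB := by
    simp only [pvColsOf, List.map_map]
    refine List.map_congr_left fun ind _ => ?_
    simp only [Function.comp_apply]
    exact (pvRecB_eq_colRec (pvLines input) (ind : Int)).symm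
  rw [part2_eq]
  unfold part2_alt
  rw [hcols] at hok htail ⊢
  have hmain := pvMain
    ((List.range ((pvLines input).headD []).length).map
      fun (ind : Nat) => pvReadCol (pvLines input) (ind : Int))
    true [] [] none hok htail (Or.inl rfl) (by simp)
  simpa using hmain
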